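-- pv_equiv track=rewrite | github.com/radomirbrkovic/algorithms | hackerrank/other/an-interesting-game-1.py | gamingArray
-- ===== SOURCE A (Python) =====
-- def gamingArray(arr):
--     moves = 0
--     cmax = 0
--
--     for i in range(len(arr)):
--         if cmax < arr[i]:
--             cmax = arr[i]
--             moves += 1
--
--     if moves % 2 == 0:
--         return 'ANDY'
--     else:
--         return 'BOB'
-- ===== SOURCE B (Python) =====
-- def gamingArray(arr):
--     running = [0]
--     for x in arr:
--         running.append(max(running[-1], x))
--     moves = len(set(running)) - 1
--     return 'ANDY' if moves % 2 == 0 else 'BOB'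
-- ===== Notes on version B (the rewrite author's own statement) =====
-- stated objective: alternative
-- what changed: Instead of counting record updates inside an index loop over range(len(arr)), B first materialises the running-maximum table seeded with 0 and derives the move count as the number of distinct values in that monotone table minus one, then branches on its parity.
import Mathlib
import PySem

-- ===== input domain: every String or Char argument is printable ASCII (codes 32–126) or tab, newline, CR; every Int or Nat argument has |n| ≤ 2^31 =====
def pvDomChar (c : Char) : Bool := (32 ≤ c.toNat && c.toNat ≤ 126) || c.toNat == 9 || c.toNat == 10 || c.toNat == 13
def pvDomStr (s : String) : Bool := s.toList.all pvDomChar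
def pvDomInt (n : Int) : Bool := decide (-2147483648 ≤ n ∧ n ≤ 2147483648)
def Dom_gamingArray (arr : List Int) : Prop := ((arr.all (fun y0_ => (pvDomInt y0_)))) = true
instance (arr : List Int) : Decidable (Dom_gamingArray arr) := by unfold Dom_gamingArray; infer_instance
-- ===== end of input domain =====

-- B re-derives the answer from the materialised running-maximum table (distinct-value count minus one) instead of A's in-loop record counter; objective: alternative decomposition, same cost.

-- ===== PORT A =====
-- counting loop over range(len(arr)): state (moves, cmax)
def gamingArray (arr : List Int) : String :=
  let st := (PySem.List.pyRange 0 arr.length 1).foldl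
    (fun (s : Int × Int) i =>
      let a := PySem.List.pyGetD arr i 0
      if s.2 < a then (s.1 + 1, a) else s) (0, 0)
  if PySem.Int.mod st.1 2 == 0 then "ANDY" else "BOB"

-- ===== PORT B =====
-- B builds the running-maximum table seeded with 0 and counts its distinct values.
def gamingArray_alt (arr : List Int) : String :=
  let running := arr.foldl (fun r x => r ++ [max (PySem.List.pyGetD r (-1) 0) x]) [0]
  let moves : Int := ((PySem.Set.ofList running).length : Int) - 1
  if PySem.Int.mod moves 2 == 0 then "ANDY" else "BOB"

-- ===== PRECONDITION & SPEC =====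
def Spec_gamingArray (arr : List Int) (out : String) : Prop := out = gamingArray_alt arr
instance (arr : List Int) (out : String) : Decidable (Spec_gamingArray arr out) := by unfold Spec_gamingArray; infer_instance

-- ===== CLAIM =====
def Claim_equal_gamingArray : Prop := ∀ (arr : List Int), Dom_gamingArray arr → Spec_gamingArray arr (gamingArray arr)

-- ===== LEMMAS AND PROOFS =====

-- tail of the running-maximum table starting from current max c
def auxRun (t : List Int) (c : Int) : List Int :=
  match t with
  | [] => []
  | x :: t => (max c x) :: auxRun t (max c x)

-- A's move count from state cmax = c
def countA (t : List Int) (c : Int) : Int :=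
  match t with
  | [] => 0
  | x :: t => if c < x then countA t x + 1 else countA t c

theorem foldlA_fst (t : List Int) (m c : Int) :
    (t.foldl (fun (s : Int × Int) a => if s.2 < a then (s.1 + 1, a) else s) (m, c)).1
      = m + countA t c := by
  induction t generalizing m c with
  | nil => simp [countA]
  | cons x t ih =>
    simp only [List.foldl_cons, countA]
    by_cases h : c < x
    · simp [h, ih]; ring
    · simp [h, ih]

theorem buildB_eq (t : List Int) (s : List Int) (c : Int) :
    t.foldl (fun r x => r ++ [max (PySem.List.pyGetD r (-1) 0) x]) (s ++ [c])
      = s ++ [c] ++ auxRun t c := by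
  induction t generalizing s c with
  | nil => simp [auxRun]
  | cons x t ih =>
    simp only [List.foldl_cons, auxRun]
    rw [PySem.List.pyGetD_neg_one_append_singleton]
    have := ih (s ++ [c]) (max c x)
    simpa [List.append_assoc] using this

theorem set_count (t : List Int) (s : PySem.Set Int) (c : Int)
    (hc : c ∈ s) (hub : ∀ y ∈ s, y ≤ c) :
    (((auxRun t c).foldl PySem.Set.add s).length : Int) = s.length + countA t c := by
  induction t generalizing s c with
  | nil => simp [auxRun, countA]
  | cons x t ih =>
    simp only [auxRun, countA, List.foldl_cons]
    by_cases h : c < x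
    · have hmax : max c x = x := max_eq_right (le_of_lt h)
      have hnx : x ∉ s := fun hx => absurd (hub x hx) (not_le.mpr h)
      have hadd : PySem.Set.add s x = s ++ [x] := by
        simp [PySem.Set.add, PySem.Set.contains]
        intro hx; exact absurd hx hnx
      rw [hmax, hadd]
      have := ih (s ++ [x]) x (by simp)
        (by intro y hy; rcases List.mem_append.mp hy with hy | hy
            · exact le_of_lt (lt_of_le_of_lt (hub y hy) h)
            · simp at hy; omega)
      rw [this]
      simp [h]; ring
    · have hmax : max c x = c := max_eq_left (not_lt.mp h)
      have hadd : PySem.Set.add s c = s := by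
        simp [PySem.Set.add, PySem.Set.contains, hc]
      rw [hmax, hadd]
      rw [ih s c hc hub]
      simp [h]

theorem movesB_eq (arr : List Int) :
    ((PySem.Set.ofList (arr.foldl (fun r x => r ++ [max (PySem.List.pyGetD r (-1) 0) x]) [0])).length : Int)
      = 1 + countA arr 0 := by
  have hb : arr.foldl (fun r x => r ++ [max (PySem.List.pyGetD r (-1) 0) x]) [0]
      = [] ++ [0] ++ auxRun arr 0 := by
    simpa using buildB_eq arr [] 0
  rw [hb]
  have hof : PySem.Set.ofList (([] : List Int) ++ [0] ++ auxRun arr 0)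
      = (auxRun arr 0).foldl PySem.Set.add [0] := by
    rw [PySem.Set.ofList_eq_foldl]
    simp [PySem.Set.add, PySem.Set.contains]
  rw [hof]
  have := set_count arr ([0] : PySem.Set Int) 0 (by simp)
    (by intro y hy; simp at hy; omega)
  simpa using this

-- ===== VERDICT =====
theorem gamingArray_spec : Claim_equal_gamingArray := by
  intro arr _
  unfold Spec_gamingArray gamingArray gamingArray_alt
  simp only
  have hR := PySem.List.foldl_pyRange_pyGetD' arr 0
    (fun (s : Int × Int) a => if s.2 < a then (s.1 + 1, a) else s) ((0 : Int), (0 : Int))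
    (a := 0) (by norm_num)
  simp only [Int.toNat_zero, List.drop_zero] at hR
  rw [hR, foldlA_fst arr 0 0, movesB_eq arr]
  norm_num
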